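-- pv_equiv track=rewrite | github.com/daidanlu/logic-puzzle-solutions | puzzles/02_100_prisoners_problem/simulation.py | simulate_cycle_strategy
-- ===== SOURCE A (Python) =====
-- def simulate_cycle_strategy(
--     boxes: list[int], num_prisoners: int, max_attempts: int
-- ) -> bool:
--     """
--     Optimal strategy (Cycle-following):
--     Prisoner i opens box i. If it's not their number j, they open box j next.
--     """
--     for prisoner in range(num_prisoners):
--         current_box = prisoner
--         found = False
--
--         for _ in range(max_attempts):
--             ticket = boxes[current_box]
--             if ticket == prisoner:
--                 found = True
--                 break
--             # Pointer chasing: the ticket dictates the next box to open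
--             current_box = ticket
--
--         # If a prisoner is caught in a cycle longer than max_attempts, they fail
--         if not found:
--             return False
--
--     return True
-- ===== SOURCE B (Python) =====
-- def simulate_cycle_strategy(
--     boxes: list[int], num_prisoners: int, max_attempts: int
-- ) -> bool:
--     """
--     Orbit/cycle variant: instead of spending up to max_attempts pointer-chasing
--     steps per prisoner, walk each prisoner's orbit once until the first repeated
--     box, recording each box's position in a dict.  The prisoner succeeds iff the
--     orbit closes back on their own box (they lie on a cycle) and that cycle's
--     length fits within max_attempts.
--     """
--     for prisoner in range(num_prisoners):
--         pos = {}
--         cur = prisoner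
--         while cur not in pos:
--             pos[cur] = len(pos)
--             cur = boxes[cur]
--         # `cur` is the first repeated box: the entry point of the orbit's cycle.
--         if cur != prisoner or len(pos) - pos[cur] > max_attempts:
--             return False
--     return True
-- ===== Notes on version B (the rewrite author's own statement) =====
-- stated objective: alternative
-- what changed: B drops A's attempt-counting inner loop: it walks each prisoner's orbit once to the first repeated box, recording positions in a dict, and decides success by the arithmetic check that the orbit closes on the prisoner's own box within max_attempts steps.
-- outside the precondition, e.g. on simulate_cycle_strategy([5], 1, 0): A returns False, B raises IndexError; on simulate_cycle_strategy([1, 0], 3, 1): A returns False, B returns False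
import Mathlib
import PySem

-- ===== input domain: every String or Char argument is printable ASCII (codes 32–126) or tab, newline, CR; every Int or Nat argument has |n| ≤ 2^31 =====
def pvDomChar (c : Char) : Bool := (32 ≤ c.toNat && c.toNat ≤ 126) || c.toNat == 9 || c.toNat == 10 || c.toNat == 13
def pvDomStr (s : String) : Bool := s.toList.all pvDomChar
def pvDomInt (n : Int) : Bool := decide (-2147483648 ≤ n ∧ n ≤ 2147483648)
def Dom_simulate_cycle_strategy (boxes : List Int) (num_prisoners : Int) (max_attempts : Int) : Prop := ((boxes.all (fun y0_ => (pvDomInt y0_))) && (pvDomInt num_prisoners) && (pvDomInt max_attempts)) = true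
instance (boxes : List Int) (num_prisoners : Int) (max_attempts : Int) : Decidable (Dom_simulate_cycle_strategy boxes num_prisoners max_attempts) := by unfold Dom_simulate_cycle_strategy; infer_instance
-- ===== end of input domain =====

-- B replaces A's attempt-bounded pointer chase per prisoner by one orbit walk to the first
-- repeated box (positions kept in a dict) and an arithmetic cycle-length check (objective: alternative).

-- ===== PORT A =====
-- inner loop: 'for _ in range(max_attempts)' pointer chase; none = IndexError from boxes[current_box]
def pvAInner (boxes : List Int) (prisoner : Int) : Nat → Int → Option Bool
  | 0, _ => some false
  | fuel+1, current_box =>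
    match PySem.List.pyGet? boxes current_box with
    | none => none
    | some ticket =>
      if ticket = prisoner then some true
      else pvAInner boxes prisoner fuel ticket

-- outer loop: 'for prisoner in range(num_prisoners)'
def pvAOuter (boxes : List Int) (max_attempts : Int) : Nat → Int → Option Bool
  | 0, _ => some true
  | k+1, prisoner =>
    match pvAInner boxes prisoner max_attempts.toNat prisoner with
    | none => none
    | some false => some false
    | some true => pvAOuter boxes max_attempts k (prisoner + 1)

def simulate_cycle_strategy (boxes : List Int) (num_prisoners : Int) (max_attempts : Int) : Bool :=
  (pvAOuter boxes max_attempts num_prisoners.toNat 0).getD false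

-- ===== PORT B =====
-- 'while cur not in pos: pos[cur] = len(pos); cur = boxes[cur]' — fueled (each iteration adds a
-- fresh key and every key after the first is a ticket value that was just used as a valid index,
-- so 2*len(boxes)+2 steps always cover Python's loop before it exits or raises);
-- none = IndexError from boxes[cur]
def pvBWalk (boxes : List Int) : Nat → PySem.Dict Int Int → Int → Option (PySem.Dict Int Int × Int)
  | 0, _, _ => none
  | fuel+1, pos, cur =>
    if pos.contains cur then some (pos, cur)
    else
      match PySem.List.pyGet? boxes cur with
      | none => none
      | some t => pvBWalk boxes fuel (pos.insert cur (pos.size : Int)) t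

-- after the walk: 'if cur != prisoner or len(pos) - pos[cur] > max_attempts: return False'
-- (success value of one prisoner; none = the IndexError propagated from the walk)
def pvBCheck (boxes : List Int) (max_attempts : Int) (prisoner : Int) : Option Bool :=
  match pvBWalk boxes (2 * boxes.length + 2) PySem.Dict.empty prisoner with
  | none => none
  | some (pos, cur) =>
    if cur = prisoner then
      match pos.get? cur with
      | none => none
      | some i => some (decide ((pos.size : Int) - i ≤ max_attempts))
    else some false

-- outer loop: 'for prisoner in range(num_prisoners)', early return on a failing prisoner
def pvBOuter (boxes : List Int) (max_attempts : Int) : Nat → Int → Option Bool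
  | 0, _ => some true
  | k+1, prisoner =>
    match pvBCheck boxes max_attempts prisoner with
    | none => none
    | some false => some false
    | some true => pvBOuter boxes max_attempts k (prisoner + 1)

def simulate_cycle_strategy_alt (boxes : List Int) (num_prisoners : Int) (max_attempts : Int) : Bool :=
  (pvBOuter boxes max_attempts num_prisoners.toNat 0).getD false

-- ===== PRECONDITION & SPEC =====
-- Pre_ restricts to the puzzle's natural domain, where no box access can leave the list:
-- at most as many prisoners as boxes and every ticket a valid box index. Outside it A raises
-- IndexError mid-chase, or — when max_attempts ≤ 0 or an early prisoner fails — returns False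
-- before reaching a bad box while B's full orbit walk still reaches it and raises.
def Pre_simulate_cycle_strategy (boxes : List Int) (num_prisoners : Int) (max_attempts : Int) : Prop :=
  num_prisoners ≤ 0 ∨
    (num_prisoners ≤ boxes.length ∧ ∀ v ∈ boxes, -(boxes.length : Int) ≤ v ∧ v < boxes.length)
instance (boxes : List Int) (num_prisoners : Int) (max_attempts : Int) : Decidable (Pre_simulate_cycle_strategy boxes num_prisoners max_attempts) := by unfold Pre_simulate_cycle_strategy; infer_instance

def pvWitness_simulate_cycle_strategy : List Int × Int × Int := ([1, 0, 2], 3, 2)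

def Spec_simulate_cycle_strategy (boxes : List Int) (num_prisoners : Int) (max_attempts : Int) (out : Bool) : Prop := out = simulate_cycle_strategy_alt boxes num_prisoners max_attempts
instance (boxes : List Int) (num_prisoners : Int) (max_attempts : Int) (out : Bool) : Decidable (Spec_simulate_cycle_strategy boxes num_prisoners max_attempts out) := by unfold Spec_simulate_cycle_strategy; infer_instance

-- ===== CLAIM (what is proved, stated in full; the proofs are below) =====
def Claim_equal_simulate_cycle_strategy : Prop := ∀ (boxes : List Int) (num_prisoners : Int) (max_attempts : Int), Dom_simulate_cycle_strategy boxes num_prisoners max_attempts → Pre_simulate_cycle_strategy boxes num_prisoners max_attempts → Spec_simulate_cycle_strategy boxes num_prisoners max_attempts (simulate_cycle_strategy boxes num_prisoners max_attempts)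

-- ===== LEMMAS AND PROOFS =====

-- the step map: value of the box opened at (valid) index v
def pvH (boxes : List Int) (v : Int) : Int := (PySem.List.pyGet? boxes v).getD 0

-- the orbit of prisoner p: the box values opened, in order
def pvSeq (boxes : List Int) (p : Int) (i : Nat) : Int := (pvH boxes)^[i] p

def pvValid (boxes : List Int) (v : Int) : Prop := -(boxes.length : Int) ≤ v ∧ v < boxes.length

-- k is a repeat point of the orbit
def pvRep (boxes : List Int) (p : Int) (k : Nat) : Prop := ∃ i < k, pvSeq boxes p k = pvSeq boxes p i

theorem pvGet_valid (boxes : List Int) (v : Int) (h : pvValid boxes v) :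
    PySem.List.pyGet? boxes v = some (pvH boxes v) := by
  have hs : (PySem.List.pyGet? boxes v).isSome := by
    rw [Option.isSome_iff_ne_none]
    intro hn
    rw [PySem.List.pyGet?_eq_none_iff] at hn
    exact hn (by simp [PySem.Raise.InRange]; obtain ⟨h1, h2⟩ := h; omega)
  obtain ⟨x, hx⟩ := Option.isSome_iff_exists.mp hs
  simp [pvH, hx]

theorem pvH_mem (boxes : List Int) (v : Int) (h : pvValid boxes v) : pvH boxes v ∈ boxes :=
  PySem.List.mem_of_pyGet?_eq_some boxes (pvGet_valid boxes v h)

theorem pvSeq_succ (boxes : List Int) (p : Int) (i : Nat) :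
    pvSeq boxes p (i+1) = pvH boxes (pvSeq boxes p i) := by
  simp [pvSeq, Function.iterate_succ_apply']

theorem pvSeq_valid (boxes : List Int) (p : Int)
    (hv : ∀ x ∈ boxes, pvValid boxes x) (hp : pvValid boxes p) :
    ∀ i, pvValid boxes (pvSeq boxes p i) := by
  intro i
  induction i with
  | zero => exact hp
  | succ n ih => rw [pvSeq_succ]; exact hv _ (pvH_mem boxes _ ih)

-- pigeonhole: the orbit stays among the 2·len(boxes) valid values, so it repeats
theorem pvRep_exists (boxes : List Int) (p : Int)
    (hv : ∀ x ∈ boxes, pvValid boxes x) (hp : pvValid boxes p) :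
    ∃ k, k ≤ 2 * boxes.length ∧ pvRep boxes p k := by
  have hmaps : ∀ a ∈ Finset.range (2 * boxes.length + 1),
      pvSeq boxes p a ∈ Finset.Ico (-(boxes.length : Int)) (boxes.length : Int) := by
    intro a _
    have := pvSeq_valid boxes p hv hp a
    simp [Finset.mem_Ico]; exact this
  have hcard : (Finset.Ico (-(boxes.length : Int)) (boxes.length : Int)).card
      < (Finset.range (2 * boxes.length + 1)).card := by
    simp [Int.card_Ico]
    omega
  obtain ⟨i, hi, j, hj, hne, heq⟩ :=
    Finset.exists_ne_map_eq_of_card_lt_of_maps_to hcard hmaps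
  rcases Nat.lt_or_ge i j with h | h
  · exact ⟨j, by simp at hj; omega, ⟨i, h, heq.symm⟩⟩
  · have : j < i := by omega
    exact ⟨i, by simp at hi; omega, ⟨j, this, heq⟩⟩

-- A's inner loop computes: the value p appears among the next `f` opened boxes
theorem pvAInner_spec (boxes : List Int) (p : Int)
    (hv : ∀ x ∈ boxes, pvValid boxes x) :
    ∀ (f : Nat) (cur : Int), pvValid boxes cur →
      pvAInner boxes p f cur = some (decide (∃ j < f, (pvH boxes)^[j+1] cur = p)) := by
  intro f
  induction f with
  | zero => intro cur _; simp [pvAInner]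
  | succ n ih =>
    intro cur hcur
    rw [pvAInner, pvGet_valid boxes cur hcur]
    simp only
    by_cases ht : pvH boxes cur = p
    · rw [if_pos ht]
      have hex : (∃ j < n+1, (pvH boxes)^[j+1] cur = p) := ⟨0, by omega, by simpa using ht⟩
      rw [decide_eq_true hex]
    · rw [if_neg ht, ih (pvH boxes cur) (hv _ (pvH_mem boxes cur hcur))]
      congr 1
      rw [decide_eq_decide]
      constructor
      · rintro ⟨j, hj, hje⟩
        exact ⟨j+1, by omega, by rwa [Function.iterate_succ_apply]⟩
      · rintro ⟨j, hj, hje⟩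
        match j with
        | 0 => exact absurd (by simpa using hje) ht
        | j+1 => exact ⟨j, by omega, by rwa [Function.iterate_succ_apply] at hje⟩

-- the dict built by B's walk after t iterations
def pvDictOf (boxes : List Int) (p : Int) (t : Nat) : PySem.Dict Int Int :=
  PySem.Dict.mk ((List.range t).map (fun i => (pvSeq boxes p i, (i : Int))))

theorem pvDictOf_keys (boxes : List Int) (p : Int) (t : Nat) :
    (pvDictOf boxes p t).keys = (List.range t).map (pvSeq boxes p) := by
  simp [pvDictOf, PySem.Dict.keys]

theorem pvDictOf_size (boxes : List Int) (p : Int) (t : Nat) :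
    (pvDictOf boxes p t).size = t := by
  simp [pvDictOf, PySem.Dict.size]

theorem pvDictOf_contains (boxes : List Int) (p : Int) (t : Nat) (v : Int) :
    (pvDictOf boxes p t).contains v = decide (∃ i < t, pvSeq boxes p i = v) := by
  rw [PySem.Dict.contains_eq_decide_mem_keys, pvDictOf_keys]
  simp [eq_comm]

theorem pvDictOf_insert (boxes : List Int) (p : Int) (t : Nat)
    (hne : ¬ ∃ i < t, pvSeq boxes p i = pvSeq boxes p t) :
    (pvDictOf boxes p t).insert (pvSeq boxes p t) (t : Int) = pvDictOf boxes p (t+1) := by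
  apply PySem.Dict.ext
  rw [PySem.Dict.items_insert_of_not_contains]
  · simp [pvDictOf, List.range_succ]
  · rw [pvDictOf_contains]; simpa using hne

-- B's walk runs to the orbit's first repeat point K and returns its dict and the repeated box
theorem pvBWalk_spec (boxes : List Int) (p : Int) (K : Nat)
    (hv : ∀ x ∈ boxes, pvValid boxes x) (hp : pvValid boxes p)
    (hK : pvRep boxes p K) (hmin : ∀ k < K, ¬ pvRep boxes p k) :
    ∀ (fuel t : Nat), t ≤ K → K < t + fuel →
      pvBWalk boxes fuel (pvDictOf boxes p t) (pvSeq boxes p t)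
        = some (pvDictOf boxes p K, pvSeq boxes p K) := by
  intro fuel
  induction fuel with
  | zero => intro t h1 h2; omega
  | succ n ih =>
    intro t h1 h2
    rcases Nat.eq_or_lt_of_le h1 with rfl | hlt
    · -- t = K : the repeat point is already a key
      obtain ⟨i, hi, hie⟩ := hK
      rw [pvBWalk, if_pos]
      rw [pvDictOf_contains]
      exact decide_eq_true ⟨i, hi, hie.symm⟩
    · -- t < K : fresh key, insert and step
      have hfresh : ¬ ∃ i < t, pvSeq boxes p i = pvSeq boxes p t := by
        intro ⟨i, hi, hie⟩
        exact hmin t hlt ⟨i, hi, hie.symm⟩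
      rw [pvBWalk, if_neg, pvGet_valid boxes _ (pvSeq_valid boxes p hv hp t)]
      · simp only
        rw [pvDictOf_size, pvDictOf_insert boxes p t hfresh, ← pvSeq_succ]
        exact ih (t+1) hlt (by omega)
      · rw [pvDictOf_contains]
        simpa using hfresh

theorem pvSeq_add (boxes : List Int) (p : Int) (a b : Nat) :
    pvSeq boxes p (a + b) = (pvH boxes)^[a] (pvSeq boxes p b) :=
  Function.iterate_add_apply (pvH boxes) a b p

theorem pvSeq_zero (boxes : List Int) (p : Int) : pvSeq boxes p 0 = p := rfl

-- core: "p reappears within m opens" iff "the orbit's first repeat is p itself, within m steps"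
theorem pvCore (boxes : List Int) (p : Int) (m : Int) (K : Nat)
    (hK : pvRep boxes p K) (hmin : ∀ k < K, ¬ pvRep boxes p k) :
    (∃ j < m.toNat, pvSeq boxes p (j+1) = p) ↔ (pvSeq boxes p K = p ∧ (K : Int) ≤ m) := by
  have hK1 : 1 ≤ K := by
    rcases Nat.eq_zero_or_pos K with h0 | h; · obtain ⟨i, hi, _⟩ := h0 ▸ hK; omega
    exact h
  constructor
  · rintro ⟨j, hj, hje⟩
    have hexQ : ∃ j, pvSeq boxes p (j+1) = p := ⟨j, hje⟩
    set j0 := Nat.find hexQ with hj0def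
    have hQ0 : pvSeq boxes p (j0+1) = p := Nat.find_spec hexQ
    have hj0le : j0 ≤ j := Nat.find_min' hexQ hje
    have hper : ∀ t, pvSeq boxes p (t + (j0+1)) = pvSeq boxes p t := by
      intro t; rw [pvSeq_add, hQ0]; rfl
    have hmul : ∀ c t, pvSeq boxes p (t + c * (j0+1)) = pvSeq boxes p t := by
      intro c
      induction c with
      | zero => intro t; simp
      | succ c ih =>
        intro t
        have he : t + (c+1) * (j0+1) = (t + (j0+1)) + c * (j0+1) := by ring
        rw [he, ih (t + (j0+1)), hper t]
    have hRepP : pvRep boxes p (j0+1) := ⟨0, by omega, by rw [hQ0, pvSeq_zero]⟩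
    have hKleP : K ≤ j0 + 1 := by
      by_contra hc
      exact hmin (j0+1) (by omega) hRepP
    rcases Nat.eq_or_lt_of_le hKleP with hKP | hKP
    · refine ⟨by rw [hKP]; exact hQ0, by omega⟩
    · -- K ≤ j0 : the repeat structure would force an earlier hit of p — contradiction
      exfalso
      obtain ⟨i0, hi0, hi0e⟩ := hK
      have hshift : ∀ u, pvSeq boxes p (u + K) = pvSeq boxes p (u + i0) := by
        intro u; rw [pvSeq_add, hi0e, ← pvSeq_add]
      set d := K - i0 with hddef
      have hd1 : 1 ≤ d := by omega
      have e1 : pvSeq boxes p (d + i0 * (j0+1)) = pvSeq boxes p d := hmul i0 d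
      have e2 : pvSeq boxes p (i0 * (j0+1)) = p := by
        have := hmul i0 0; rwa [Nat.zero_add, pvSeq_zero] at this
      have hi0P : i0 ≤ i0 * (j0+1) := Nat.le_mul_of_pos_right i0 (by omega)
      have he : d + i0 * (j0+1) = (i0 * (j0+1) - i0) + K := by omega
      have he2 : (i0 * (j0+1) - i0) + i0 = i0 * (j0+1) := by omega
      have hsd : pvSeq boxes p d = p := by
        rw [← e1, he, hshift, he2, e2]
      have : ¬ pvSeq boxes p ((d-1)+1) = p := Nat.find_min hexQ (by omega)
      rw [Nat.sub_add_cancel hd1] at this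
      exact this hsd
  · rintro ⟨hsK, hKm⟩
    exact ⟨K - 1, by omega, by rw [Nat.sub_add_cancel hK1]; exact hsK⟩

-- B's per-prisoner check agrees with A's inner loop on valid prisoners
theorem pvCheck_eq (boxes : List Int) (m : Int) (p : Int)
    (hv : ∀ x ∈ boxes, pvValid boxes x) (hp : pvValid boxes p) :
    pvBCheck boxes m p = pvAInner boxes p m.toNat p := by
  letI : DecidablePred (pvRep boxes p) := fun k => by unfold pvRep; infer_instance
  obtain ⟨k, hk2n, hrep⟩ := pvRep_exists boxes p hv hp
  have hex : ∃ k, pvRep boxes p k := ⟨k, hrep⟩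
  set K := Nat.find hex with hKdef
  have hK : pvRep boxes p K := Nat.find_spec hex
  have hmin : ∀ j < K, ¬ pvRep boxes p j := fun j hj => Nat.find_min hex hj
  have hKle : K ≤ k := Nat.find_min' hex hrep
  have hK1 : 1 ≤ K := by
    rcases Nat.eq_zero_or_pos K with h0 | h; · obtain ⟨i, hi, _⟩ := h0 ▸ hK; omega
    exact h
  have hwalk : pvBWalk boxes (2 * boxes.length + 2) PySem.Dict.empty p
      = some (pvDictOf boxes p K, pvSeq boxes p K) := by
    have h0 : PySem.Dict.empty = pvDictOf boxes p 0 := rfl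
    have hs0 : p = pvSeq boxes p 0 := rfl
    rw [h0]
    conv_lhs => rw [hs0]
    exact pvBWalk_spec boxes p K hv hp hK hmin _ 0 (by omega) (by omega)
  have hA : pvAInner boxes p m.toNat p
      = some (decide (∃ j < m.toNat, pvSeq boxes p (j+1) = p)) :=
    pvAInner_spec boxes p hv m.toNat p hp
  rw [pvBCheck, hwalk, hA]
  simp only
  by_cases hcur : pvSeq boxes p K = p
  · rw [if_pos hcur]
    have hnd : (pvDictOf boxes p K).keys.Nodup := by
      rw [pvDictOf_keys]
      rw [List.nodup_map_iff_inj_on (List.nodup_range)]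
      intro a ha b hb hab
      simp only [List.mem_range] at ha hb
      by_contra hne
      rcases Nat.lt_or_ge a b with h | h
      · exact hmin b hb ⟨a, h, hab.symm⟩
      · exact hmin a ha ⟨b, by omega, hab⟩
    have hmemit : (p, (0 : Int)) ∈ (pvDictOf boxes p K).items := by
      simp only [pvDictOf]
      refine List.mem_map.mpr ⟨0, ?_, by simp [pvSeq_zero]⟩
      simp [List.mem_range]; omega
    have hget : (pvDictOf boxes p K).get? (pvSeq boxes p K) = some 0 := by
      rw [hcur]; exact PySem.Dict.get?_of_mem_items _ hmemit hnd
    rw [hget]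
    simp only [pvDictOf_size]
    congr 1
    rw [decide_eq_decide]
    rw [pvCore boxes p m K hK hmin]
    constructor
    · intro h; exact ⟨hcur, by omega⟩
    · rintro ⟨_, h2⟩; omega
  · rw [if_neg hcur]
    congr 1
    have : ¬ (∃ j < m.toNat, pvSeq boxes p (j+1) = p) := by
      rw [pvCore boxes p m K hK hmin]
      intro ⟨h1, _⟩; exact hcur h1
    exact (decide_eq_false this).symm

-- the two drivers agree once the per-prisoner bodies agree on the traversed prisoners
theorem pvDriver (boxes : List Int) (m : Int) :
    ∀ (k : Nat) (start : Int),
      (∀ j : Nat, j < k → pvAInner boxes (start + j) m.toNat (start + j) = pvBCheck boxes m (start + j)) →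
      pvAOuter boxes m k start = pvBOuter boxes m k start := by
  intro k
  induction k with
  | zero => intro start _; rfl
  | succ n ih =>
    intro start hpt
    have h0 : pvAInner boxes start m.toNat start = pvBCheck boxes m start := by
      have := hpt 0 (by omega)
      simpa using this
    rw [pvAOuter, pvBOuter, h0]
    cases hB : pvBCheck boxes m start with
    | none => rfl
    | some b =>
      cases b with
      | false => rfl
      | true =>
        simp only
        apply ih
        intro j hj
        have := hpt (j+1) (by omega)
        have harr : start + ((j : Int) + 1) = start + 1 + (j : Int) := by ring
        simpa [harr] using this

-- ===== VERDICT (by name: the statement is the Claim_ definition above) =====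
theorem simulate_cycle_strategy_spec : Claim_equal_simulate_cycle_strategy := by
  intro boxes num_prisoners max_attempts _ hpre
  unfold Spec_simulate_cycle_strategy simulate_cycle_strategy simulate_cycle_strategy_alt
  by_cases hn0 : num_prisoners ≤ 0
  · have : num_prisoners.toNat = 0 := by omega
    rw [this]
    rfl
  · rcases hpre with h | ⟨hnum, hv'⟩
    · omega
    · have hv : ∀ x ∈ boxes, pvValid boxes x := hv'
      rw [pvDriver boxes max_attempts num_prisoners.toNat 0 ?_]
      intro j hj
      exact (pvCheck_eq boxes max_attempts _ hv ⟨by omega, by omega⟩).symm
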